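-- pv_equiv track=rewrite | github.com/mrcork/BIO | 2018/Q2.py | create_second_dial
-- ===== SOURCE A (Python) =====
-- from string import ascii_uppercase as letters
--
-- def create_second_dial(n):
--     ''' expects an integer n
--     iterates through a list of letters A to Z
--     moves n places and adds this letter to the dial
--     adjusts the position depending on the number of letters left'''
--
--     index = 0
--     letters_to_add = list(letters)
--     second_dial = ''
--     for letter in letters:
--         index = (index + n  - 1) % len(letters_to_add)
--         second_dial += letters_to_add.pop(index)
--     return second_dial
-- ===== SOURCE B (Python) =====
-- from string import ascii_uppercase as letters
--
-- def create_second_dial(n):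
--     """Fixed 26-slot boolean 'alive' mask with a rank-scan instead of a
--     shrinking list with pop(index)."""
--     alive = [True] * 26
--     out = []
--     index = 0
--     for remaining in range(26, 0, -1):
--         index = (index + n - 1) % remaining
--         k = index
--         pos = 0
--         while not alive[pos] or k > 0:
--             if alive[pos]:
--                 k -= 1
--             pos += 1
--         out.append(letters[pos])
--         alive[pos] = False
--     return ''.join(out)
-- ===== Notes on version B (the rewrite author's own statement) =====
-- stated objective: alternative
-- what changed: Replaces the shrinking list with pop(index) by a persistent fixed-size boolean alive-mask over the alphabet plus an explicit rank-scan (walk counting live slots) to select and kill each letter.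
import Mathlib
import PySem

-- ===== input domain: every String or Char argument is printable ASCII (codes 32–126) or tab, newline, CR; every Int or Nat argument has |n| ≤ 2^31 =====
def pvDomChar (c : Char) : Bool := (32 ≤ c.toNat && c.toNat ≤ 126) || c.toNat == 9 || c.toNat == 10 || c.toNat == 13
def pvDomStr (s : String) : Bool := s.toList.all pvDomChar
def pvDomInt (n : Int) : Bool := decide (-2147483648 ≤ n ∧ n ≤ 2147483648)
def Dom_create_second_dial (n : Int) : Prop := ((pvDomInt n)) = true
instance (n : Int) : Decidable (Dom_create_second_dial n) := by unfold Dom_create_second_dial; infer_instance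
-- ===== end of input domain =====

-- B replaces the shrinking list + pop(index) by a fixed alive-mask with a rank-scan (alternative, same cost).

-- ===== PORT A =====
def pvLetters : List Char := "ABCDEFGHIJKLMNOPQRSTUVWXYZ".toList

-- loop body of A: index = (index + n - 1) % len(letters_to_add); second_dial += letters_to_add.pop(index)
def pvStepA (n : Int) (st : Int × List Char × List Char) (_ : Char) : Int × List Char × List Char :=
  let index := PySem.Int.mod (st.1 + n - 1) (st.2.1.length : Int)
  match PySem.List.pop? st.2.1 index with
  | some (c, rest) => (index, rest, st.2.2 ++ [c])
  | none => (index, st.2.1, st.2.2)   -- Python would raise IndexError; unreachable (list never empty)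

def create_second_dial (n : Int) : String :=
  let r := pvLetters.foldl (pvStepA n) (0, pvLetters, [])
  String.ofList r.2.2

-- ===== PORT B =====
-- the while-loop of B: walk to the k-th alive slot, return its letter and mark it dead
def pvKill : List (Char × Bool) → Nat → Char × List (Char × Bool)
  | [], _ => ('A', [])                         -- unreachable: rank stays below the live count
  | (c, true) :: rest, 0 => (c, (c, false) :: rest)
  | (c, true) :: rest, k+1 => let p := pvKill rest k; (p.1, (c, true) :: p.2)
  | (c, false) :: rest, k => let p := pvKill rest k; (p.1, (c, false) :: p.2)

def pvStepB (n : Int) (st : Int × List (Char × Bool) × List Char) (remaining : Int) :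
    Int × List (Char × Bool) × List Char :=
  let index := PySem.Int.mod (st.1 + n - 1) remaining
  let p := pvKill st.2.1 index.toNat
  (index, p.2, st.2.2 ++ [p.1])

def create_second_dial_alt (n : Int) : String :=
  let r := (PySem.List.pyRange 26 0 (-1)).foldl (pvStepB n) (0, pvLetters.map (fun c => (c, true)), [])
  String.ofList r.2.2

-- ===== PRECONDITION & SPEC =====
def Spec_create_second_dial (n : Int) (out : String) : Prop := out = create_second_dial_alt n
instance (n : Int) (out : String) : Decidable (Spec_create_second_dial n out) := by unfold Spec_create_second_dial; infer_instance

-- ===== CLAIM (what is proved, stated in full; the proofs are below) =====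
def Claim_equal_create_second_dial : Prop := ∀ (n : Int), Dom_create_second_dial n → Spec_create_second_dial n (create_second_dial n)

-- ===== LEMMAS AND PROOFS =====

-- the letters still alive in a mask, in order
def pvAlive (m : List (Char × Bool)) : List Char := (m.filter (·.2)).map (·.1)

lemma pvKill_spec : ∀ (m : List (Char × Bool)) (k : Nat), k < (pvAlive m).length →
    (pvKill m k).1 = (pvAlive m).getD k 'A' ∧ pvAlive (pvKill m k).2 = (pvAlive m).eraseIdx k := by
  intro m
  induction m with
  | nil => intro k h; simp [pvAlive] at h
  | cons hd tl ih =>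
    intro k h
    obtain ⟨c, b⟩ := hd
    cases b with
    | false =>
      have h' : k < (pvAlive tl).length := by simpa [pvAlive] using h
      have := ih k h'
      simp [pvKill, pvAlive] at this ⊢
      try exact this
    | true =>
      cases k with
      | zero => simp [pvKill, pvAlive]
      | succ k =>
        have h' : k < (pvAlive tl).length := by
          simp [pvAlive] at h ⊢; omega
        have := ih k h'
        simp [pvKill, pvAlive] at this ⊢
        try exact this

lemma pvLoop_eq (n : Int) : ∀ (L : List Char) (m : List (Char × Bool)) (i : Int) (acc : List Char),
    L.length ≤ (pvAlive m).length →
    (L.foldl (pvStepA n) (i, pvAlive m, acc)).2.2 =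
      ((PySem.List.pyRange ((pvAlive m).length : Int) (((pvAlive m).length : Int) - L.length) (-1)).foldl
        (pvStepB n) (i, m, acc)).2.2 := by
  intro L
  induction L with
  | nil => intro m i acc _; simp [PySem.List.pyRange_neg_one_eq_nil]
  | cons c L' ih =>
    intro m i acc hlen
    have hpos : 0 < (pvAlive m).length := by simp at hlen; omega
    have hlpos : (0 : Int) < ((pvAlive m).length : Int) := by exact_mod_cast hpos
    rw [PySem.List.pyRange_neg_one_cons (by simp at hlen ⊢; try omega)]
    have hge := PySem.Int.mod_nonneg (i + n - 1) hlpos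
    have hlt := PySem.Int.mod_lt (i + n - 1) hlpos
    obtain ⟨k, hk⟩ : ∃ k : Nat, PySem.Int.mod (i + n - 1) ((pvAlive m).length : Int) = (k : Int) :=
      ⟨(PySem.Int.mod (i + n - 1) ((pvAlive m).length : Int)).toNat, (Int.toNat_of_nonneg hge).symm⟩
    have hkn : k < (pvAlive m).length := by rw [hk] at hlt; exact_mod_cast hlt
    have hkill := pvKill_spec m k hkn
    have hchar : (pvKill m k).1 = (pvAlive m)[k] := by
      rw [hkill.1, List.getD_eq_getElem _ _ hkn]
    have hstepA : pvStepA n (i, pvAlive m, acc) c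
        = ((k : Int), (pvAlive m).eraseIdx k, acc ++ [(pvAlive m)[k]]) := by
      simp only [pvStepA, hk, PySem.List.pop?_natCast _ _ hkn]
    have hstepB : pvStepB n (i, m, acc) ((pvAlive m).length : Int)
        = ((k : Int), (pvKill m k).2, acc ++ [(pvAlive m)[k]]) := by
      simp only [pvStepB, hk, Int.toNat_natCast, hchar]
    simp only [List.foldl_cons, hstepA, hstepB]
    have hL : ((pvAlive m).eraseIdx k).length = (pvAlive m).length - 1 :=
      List.length_eraseIdx_of_lt hkn
    have hlen' : L'.length ≤ (pvAlive (pvKill m k).2).length := by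
      rw [hkill.2, hL]; simp at hlen; omega
    have := ih (pvKill m k).2 (k : Int) (acc ++ [(pvAlive m)[k]]) hlen'
    rw [hkill.2, hL] at this
    have hc1 : (((pvAlive m).length - 1 : Nat) : Int) = ((pvAlive m).length : Int) - 1 := by omega
    have hc2 : ((pvAlive m).length : Int) - 1 - (L'.length : Int)
        = ((pvAlive m).length : Int) - ((c :: L').length : Int) := by simp; ring
    rw [hc1, hc2] at this
    exact this

lemma pvAlive_init : pvAlive (pvLetters.map (fun c => (c, true))) = pvLetters := by
  decide

-- ===== VERDICT (by name: the statement is the Claim_ definition above) =====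
theorem create_second_dial_spec : Claim_equal_create_second_dial := by
  intro n _
  unfold Spec_create_second_dial create_second_dial create_second_dial_alt
  have h := pvLoop_eq n pvLetters (pvLetters.map (fun c => (c, true))) 0 []
  rw [pvAlive_init] at h
  have h26 : pvLetters.length = 26 := by decide
  rw [h26] at h
  have := h (by omega)
  norm_num at this ⊢
  rw [this]
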